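-- pv_equiv track=rewrite | github.com/olimiemma/ARC-Prize-2025-Kaggle-ARC-AGI-2-Benchmark- | arc_prize_2025_submission/versions/arc_solver_v2.py | infer_bijective_palette_map
-- ===== SOURCE A (Python) =====
-- from typing import Any, Dict, List, Tuple, Optional
--
-- Grid = List[List[int]]
--
-- def dims(g: Grid) -> Tuple[int, int]:
--     return (len(g), len(g[0]) if g else 0)
--
-- PaletteMap = Dict[int, int]
--
-- def infer_bijective_palette_map(src: Grid, dst: Grid) -> Optional[PaletteMap]:
--     if dims(src) != dims(dst):
--         return None
--     mapping: Dict[int, int] = {}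
--     inverse: Dict[int, int] = {}
--     h, w = dims(src)
--     for r in range(h):
--         for c in range(w):
--             s, d = src[r][c], dst[r][c]
--             if s in mapping and mapping[s] != d:
--                 return None
--             if d in inverse and inverse[d] != s:
--                 return None
--             mapping[s] = d
--             inverse[d] = s
--     return mapping
-- ===== SOURCE B (Python) =====
-- def infer_bijective_palette_map(src, dst):
--     if (len(src), len(src[0]) if src else 0) != (len(dst), len(dst[0]) if dst else 0):
--         return None
--     w = len(src[0]) if src else 0
--     # phase 1: group, per source colour, the SET of destination colours it lands on
--     groups = {}
--     for rs, rd in zip(src, dst):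
--         for s, d in zip(rs[:w], rd[:w]):
--             groups.setdefault(s, set()).add(d)
--     # phase 2: the pairing is a function iff every group is a singleton,
--     # and injective iff those singleton destinations are pairwise different
--     if any(len(v) != 1 for v in groups.values()):
--         return None
--     heads = [next(iter(v)) for v in groups.values()]
--     if len(set(heads)) != len(heads):
--         return None
--     return {s: next(iter(v)) for s, v in groups.items()}
-- ===== Notes on version B (the rewrite author's own statement) =====
-- stated objective: alternative
-- what changed: A does one interleaved cell sweep maintaining both a forward and an inverse dict and aborting on the first conflict; B never builds an inverse: it groups, per source colour, the set of destination colours it meets, then decides bijectivity globally (every group a singleton = well-defined; the singleton destinations pairwise distinct = injective, a cardinality check via set()).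
import Mathlib
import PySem

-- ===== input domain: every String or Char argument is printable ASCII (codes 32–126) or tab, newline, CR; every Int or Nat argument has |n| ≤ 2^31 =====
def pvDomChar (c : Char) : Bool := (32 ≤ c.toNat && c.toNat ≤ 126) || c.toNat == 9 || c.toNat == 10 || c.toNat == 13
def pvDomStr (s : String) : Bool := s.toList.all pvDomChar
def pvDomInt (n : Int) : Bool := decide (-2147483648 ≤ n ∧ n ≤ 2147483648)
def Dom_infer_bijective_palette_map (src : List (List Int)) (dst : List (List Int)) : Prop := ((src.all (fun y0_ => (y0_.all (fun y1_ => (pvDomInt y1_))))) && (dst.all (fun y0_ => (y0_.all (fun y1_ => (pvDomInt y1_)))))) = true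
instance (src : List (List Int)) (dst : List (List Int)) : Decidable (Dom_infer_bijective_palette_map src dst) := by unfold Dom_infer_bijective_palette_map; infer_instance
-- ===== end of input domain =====

-- B replaces A's interleaved forward+inverse-dict sweep with a grouping algorithm that needs
-- no inverse dict: group per source colour the set of destinations it meets, then decide
-- bijectivity globally (all groups singletons, and those singletons pairwise distinct via a
-- cardinality check). Objective: alternative.

-- ===== PORT A =====
-- helper `dims` of the Python module
def pvDims (g : List (List Int)) : Int × Int :=
  ((g.length : Int), match g with | [] => (0 : Int) | r :: _ => (r.length : Int))

-- inner `for c in range(w)` loop; `return None` inside the loop = none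
def pvACell (src dst : List (List Int)) (r : Int) (cs : List Int)
    (m inv : PySem.Dict Int Int) : Option (PySem.Dict Int Int × PySem.Dict Int Int) :=
  match cs with
  | [] => some (m, inv)
  | c :: cs' =>
    match (PySem.List.pyGet? src r).bind (fun row => PySem.List.pyGet? row c),
          (PySem.List.pyGet? dst r).bind (fun row => PySem.List.pyGet? row c) with
    | some s, some d =>
      if (m.get? s).any (fun v => v != d) then none          -- s in mapping and mapping[s] != d
      else if (inv.get? d).any (fun u => u != s) then none   -- d in inverse and inverse[d] != s
      else pvACell src dst r cs' (m.insert s d) (inv.insert d s)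
    | _, _ => none  -- IndexError (outside Pre_)

-- outer `for r in range(h)` loop
def pvARows (src dst : List (List Int)) (w : Int) (rs : List Int)
    (m inv : PySem.Dict Int Int) : Option (PySem.Dict Int Int × PySem.Dict Int Int) :=
  match rs with
  | [] => some (m, inv)
  | r :: rs' =>
    match pvACell src dst r (PySem.List.pyRange 0 w) m inv with
    | some (m', inv') => pvARows src dst w rs' m' inv'
    | none => none

def infer_bijective_palette_map (src : List (List Int)) (dst : List (List Int)) :
    Option (List (Int × Int)) :=
  if pvDims src ≠ pvDims dst then none
  else
    match pvARows src dst (pvDims src).2 (PySem.List.pyRange 0 (src.length : Int))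
        PySem.Dict.empty PySem.Dict.empty with
    | some (m, _) => some m.items
    | none => none

-- ===== PORT B =====
-- the `(len(g), len(g[0]) if g else 0)` dimension tuple B computes inline
def pvShape (g : List (List Int)) : Int × Int :=
  ((g.length : Int), match g with | [] => (0 : Int) | r :: _ => (r.length : Int))

-- `groups.setdefault(s, set()).add(d)`: the set stored at key s is mutated in place, i.e.
-- the value at s's dict position becomes its old value (default: the empty set) with d added
def pvAddPair (g : PySem.Dict Int (PySem.Set Int)) (p : Int × Int) :
    PySem.Dict Int (PySem.Set Int) :=
  g.insert p.1 (PySem.Set.add (g.getD p.1 PySem.Set.empty) p.2)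

-- the nested `for rs, rd in zip(src, dst): for s, d in zip(rs[:w], rd[:w]): …` loops
def pvBRows (rows : List (List Int × List Int)) (w : Int)
    (g : PySem.Dict Int (PySem.Set Int)) : PySem.Dict Int (PySem.Set Int) :=
  match rows with
  | [] => g
  | rr :: rows' =>
    pvBRows rows' w
      (((PySem.List.slice rr.1 none (some w)).zip (PySem.List.slice rr.2 none (some w))).foldl
        pvAddPair g)

-- phase 2: the two checks and the result comprehension; `next(iter(v))` of a singleton set
-- is its lone element, ported as `v.headD 0` (exact: v is nonempty here)
def pvBFinish (g : PySem.Dict Int (PySem.Set Int)) : Option (List (Int × Int)) :=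
  if g.values.any (fun v => v.length ≠ 1) then none
  else  -- heads = [next(iter(v)) for v in groups.values()]
    if (PySem.Set.ofList (g.values.map (fun v => v.headD 0))).length ≠
        (g.values.map (fun v => v.headD 0)).length then none
    else some (g.items.map (fun p => (p.1, p.2.headD 0)))

def infer_bijective_palette_map_alt (src : List (List Int)) (dst : List (List Int)) :
    Option (List (Int × Int)) :=
  if pvShape src ≠ pvShape dst then none
  else pvBFinish (pvBRows (src.zip dst) (pvShape src).2 PySem.Dict.empty)

-- ===== PRECONDITION & SPEC =====
-- Pre_ excludes exactly the inputs on which A raises IndexError: when the outer dimensions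
-- (row count and first-row width) coincide, some later row must not be shorter than the
-- first row's width w, since A reads w cells from every row.
def Pre_infer_bijective_palette_map (src : List (List Int)) (dst : List (List Int)) : Prop :=
  (src.length = dst.length ∧ (src.headD []).length = (dst.headD []).length) →
    ((∀ row ∈ src, (src.headD []).length ≤ row.length) ∧
     (∀ row ∈ dst, (src.headD []).length ≤ row.length))
instance (src : List (List Int)) (dst : List (List Int)) :
    Decidable (Pre_infer_bijective_palette_map src dst) := by
  unfold Pre_infer_bijective_palette_map; infer_instance

def pvWitness_infer_bijective_palette_map : List (List Int) × List (List Int) :=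
  ([[1, 2], [2, 1]], [[3, 4], [4, 3]])

def Spec_infer_bijective_palette_map (src : List (List Int)) (dst : List (List Int))
    (out : Option (List (Int × Int))) : Prop := out = infer_bijective_palette_map_alt src dst
instance (src : List (List Int)) (dst : List (List Int)) (out : Option (List (Int × Int))) :
    Decidable (Spec_infer_bijective_palette_map src dst out) := by
  unfold Spec_infer_bijective_palette_map; infer_instance

-- ===== CLAIM (what is proved, stated in full; the proofs are below) =====
def Claim_equal_infer_bijective_palette_map : Prop := ∀ (src : List (List Int)) (dst : List (List Int)), Dom_infer_bijective_palette_map src dst → Pre_infer_bijective_palette_map src dst → Spec_infer_bijective_palette_map src dst (infer_bijective_palette_map src dst)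

-- ===== LEMMAS AND PROOFS =====

-- A's cell loop restated as a state machine over an explicit list of (s, d) pairs
def pvStRun : List (Int × Int) → PySem.Dict Int Int → PySem.Dict Int Int →
    Option (PySem.Dict Int Int × PySem.Dict Int Int)
  | [], m, i => some (m, i)
  | (s, d) :: ps, m, i =>
    if (m.get? s).any (fun v => v != d) then none
    else if (i.get? d).any (fun u => u != s) then none
    else pvStRun ps (m.insert s d) (i.insert d s)

theorem pvStRun_append (xs ys : List (Int × Int)) (m i : PySem.Dict Int Int) :
    pvStRun (xs ++ ys) m i =
      match pvStRun xs m i with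
      | some (m', i') => pvStRun ys m' i'
      | none => none := by
  induction xs generalizing m i with
  | nil => rfl
  | cons p ps ih =>
    obtain ⟨s, d⟩ := p
    simp only [pvStRun, List.cons_append]
    split_ifs <;> simp [ih]

theorem pvACell_eq_st (src dst : List (List Int)) (srow drow : List Int) (r : Int)
    (hs : PySem.List.pyGet? src r = some srow) (hd : PySem.List.pyGet? dst r = some drow)
    (w : Nat) (hws : w ≤ srow.length) (hwd : w ≤ drow.length)
    (k : Nat) (hk : k ≤ w) (m i : PySem.Dict Int Int) :
    pvACell src dst r (PySem.List.pyRange (k : Int) (w : Int)) m i =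
      pvStRun (((srow.take w).drop k).zip ((drow.take w).drop k)) m i := by
  suffices H : ∀ n k, w - k = n → k ≤ w → ∀ m i : PySem.Dict Int Int,
      pvACell src dst r (PySem.List.pyRange (k : Int) (w : Int)) m i =
        pvStRun (((srow.take w).drop k).zip ((drow.take w).drop k)) m i by
    exact H (w - k) k rfl hk m i
  intro n
  induction n with
  | zero =>
    intro k hn hk' m i
    have hkw : k = w := by omega
    subst hkw
    have h0 : PySem.List.pyRange (k : Int) (k : Int) = [] := by
      rw [PySem.List.pyRange_one]; simp
    have h1 : (srow.take k).drop k = [] :=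
      List.drop_eq_nil_of_le (by simp)
    rw [h0, h1]
    rfl
  | succ n ihn =>
    intro k hn hk' m i
    have hkw : k < w := by omega
    rw [PySem.List.pyRange_one_cons (by exact_mod_cast hkw)]
    have hks : k < srow.length := lt_of_lt_of_le hkw hws
    have hkd : k < drow.length := lt_of_lt_of_le hkw hwd
    have hgs : PySem.List.pyGet? srow (k : Int) = some srow[k] := by
      rw [PySem.List.pyGet?_natCast, List.getElem?_eq_getElem hks]
    have hgd : PySem.List.pyGet? drow (k : Int) = some drow[k] := by
      rw [PySem.List.pyGet?_natCast, List.getElem?_eq_getElem hkd]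
    have hts : (srow.take w).drop k = srow[k] :: (srow.take w).drop (k + 1) := by
      rw [List.drop_eq_getElem_cons (by simp [hkw, hks])]
      congr 1
      simp
    have htd : (drow.take w).drop k = drow[k] :: (drow.take w).drop (k + 1) := by
      rw [List.drop_eq_getElem_cons (by simp [hkw, hkd])]
      congr 1
      simp
    rw [hts, htd, List.zip_cons_cons]
    simp only [pvACell, hs, hd, Option.bind_some, hgs, hgd, pvStRun]
    split_ifs
    · rfl
    · rfl
    · have : ((k : Int) + 1) = ((k + 1 : Nat) : Int) := by push_cast; ring
      rw [this]
      exact ihn (k + 1) (by omega) (by omega) _ _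

theorem pvARows_eq_st (src dst : List (List Int)) (w : Nat)
    (hlen : dst.length = src.length)
    (hws : ∀ row ∈ src, w ≤ row.length) (hwd : ∀ row ∈ dst, w ≤ row.length)
    (k : Nat) (m i : PySem.Dict Int Int) :
    pvARows src dst (w : Int) (PySem.List.pyRange (k : Int) (src.length : Int)) m i =
      pvStRun (((src.drop k).zip (dst.drop k)).flatMap
        (fun rr => (rr.1.take w).zip (rr.2.take w))) m i := by
  suffices H : ∀ n k, src.length - k = n → ∀ m i : PySem.Dict Int Int,
      pvARows src dst (w : Int) (PySem.List.pyRange (k : Int) (src.length : Int)) m i =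
        pvStRun (((src.drop k).zip (dst.drop k)).flatMap
          (fun rr => (rr.1.take w).zip (rr.2.take w))) m i by
    exact H (src.length - k) k rfl m i
  intro n
  induction n with
  | zero =>
    intro k hn m i
    have hk : src.length ≤ k := by omega
    have h0 : PySem.List.pyRange (k : Int) (src.length : Int) = [] := by
      rw [PySem.List.pyRange_one]
      have : ((src.length : Int) - (k : Int)).toNat = 0 := by omega
      rw [this]
      rfl
    rw [h0, List.drop_eq_nil_of_le hk]
    rfl
  | succ n ihn =>
    intro k hn m i
    have hks : k < src.length := by omega
    have hkd : k < dst.length := by omega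
    rw [PySem.List.pyRange_one_cons (by exact_mod_cast hks)]
    rw [List.drop_eq_getElem_cons hks, List.drop_eq_getElem_cons hkd,
      List.zip_cons_cons, List.flatMap_cons, pvStRun_append]
    have hgs : PySem.List.pyGet? src (k : Int) = some src[k] := by
      rw [PySem.List.pyGet?_natCast, List.getElem?_eq_getElem hks]
    have hgd : PySem.List.pyGet? dst (k : Int) = some dst[k] := by
      rw [PySem.List.pyGet?_natCast, List.getElem?_eq_getElem hkd]
    have hcell : pvACell src dst (k : Int) (PySem.List.pyRange 0 (w : Int)) m i =
        pvStRun ((src[k].take w).zip (dst[k].take w)) m i := by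
      have := pvACell_eq_st src dst src[k] dst[k] (k : Int) hgs hgd w
        (hws src[k] (List.getElem_mem hks)) (hwd dst[k] (List.getElem_mem hkd))
        0 (Nat.zero_le w) m i
      simpa using this
    simp only [pvARows, hcell]
    cases hres : pvStRun ((src[k].take w).zip (dst[k].take w)) m i with
    | none => rfl
    | some st =>
      obtain ⟨m', i'⟩ := st
      have : ((k : Int) + 1) = ((k + 1 : Nat) : Int) := by push_cast; ring
      rw [this]
      exact ihn (k + 1) (by omega) m' i'

-- inserting the value a key already has leaves the dict unchanged
theorem pv_insert_self {ν : Type} [DecidableEq ν] (d : PySem.Dict Int ν) (k : Int) (v : ν)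
    (hn : d.keys.Nodup) (h : d.get? k = some v) : d.insert k v = d := by
  apply PySem.Dict.ext
  rw [PySem.Dict.items_insert_of_contains _ _
    (by rw [PySem.Dict.contains_eq_isSome_get?, h]; rfl)]
  have : ∀ p ∈ d.items, (fun p : Int × ν => if (p.1 == k) = true then (k, v) else p) p = p := by
    intro p hp
    by_cases hpk : p.1 = k
    · have : d.get? p.1 = some p.2 := PySem.Dict.get?_of_mem_items d hp hn
      rw [hpk, h] at this
      have hv : p.2 = v := (Option.some.inj this).symm
      subst hpk
      simp [← hv]
    · simp [hpk]
  rw [List.map_congr_left this]; exact List.map_id _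

-- B's nested row loops are one fold of pvAddPair over the flattened pair list
theorem pvBRows_eq_foldl (rows : List (List Int × List Int)) (w : Int)
    (g : PySem.Dict Int (PySem.Set Int)) :
    pvBRows rows w g =
      (rows.flatMap (fun rr =>
        (PySem.List.slice rr.1 none (some w)).zip (PySem.List.slice rr.2 none (some w)))).foldl
        pvAddPair g := by
  induction rows generalizing g with
  | nil => rfl
  | cons rr rows ih => simp only [pvBRows, List.flatMap_cons, List.foldl_append, ih]

-- basic wellformedness of a groups dict: unique keys, no empty set stored
def pvGInv (g : PySem.Dict Int (PySem.Set Int)) : Prop :=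
  g.keys.Nodup ∧ ∀ p ∈ g.items, p.2 ≠ []

-- a groups dict that already certifies failure: some group not a singleton is inevitable
def pvBad (g : PySem.Dict Int (PySem.Set Int)) : Prop :=
  (∃ v ∈ g.values, 2 ≤ v.length) ∨ ¬ (g.values.map (fun v => v.headD 0)).Nodup

theorem pvGInv_step (g : PySem.Dict Int (PySem.Set Int)) (p : Int × Int) (h : pvGInv g) :
    pvGInv (pvAddPair g p) := by
  obtain ⟨hn, hne⟩ := h
  constructor
  · exact PySem.Dict.nodup_keys_insert g p.1 _ hn
  · intro q hq
    rcases (PySem.Dict.mem_items_insert _ _ _ _).mp hq with hq | ⟨hq, _⟩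
    · subst hq
      simp only
      rw [PySem.Set.add_eq_ite]
      split_ifs with hm
      · intro hc
        rw [hc] at hm
        exact absurd hm (List.not_mem_nil)
      · simp
    · exact hne q hq

theorem pv_headD_add (v : PySem.Set Int) (d : Int) (h : v ≠ []) :
    (PySem.Set.add v d).headD 0 = v.headD 0 := by
  rw [PySem.Set.add_eq_ite]
  split_ifs with hm
  · rfl
  · cases v with
    | nil => exact absurd rfl h
    | cons a v => rfl

theorem pvBad_step (g : PySem.Dict Int (PySem.Set Int)) (p : Int × Int)
    (hg : pvGInv g) (h : pvBad g) : pvBad (pvAddPair g p) := by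
  obtain ⟨hn, hne⟩ := hg
  unfold pvAddPair
  by_cases hc : g.contains p.1 = true
  · have hitems := PySem.Dict.items_insert_of_contains g
      (PySem.Set.add (g.getD p.1 PySem.Set.empty) p.2) hc
    rcases h with ⟨v, hv, hlen⟩ | hdup
    · -- a value of length ≥ 2 persists (it is either untouched or only grows)
      left
      simp only [PySem.Dict.values] at hv ⊢
      obtain ⟨q, hq, hqv⟩ := List.mem_map.mp hv
      rw [hitems, List.map_map]
      by_cases hk : q.1 = p.1
      · refine ⟨PySem.Set.add (g.getD p.1 PySem.Set.empty) p.2, ?_, ?_⟩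
        · exact List.mem_map.mpr ⟨q, hq, by simp [Function.comp, hk]⟩
        · have hqm : (p.1, q.2) ∈ g.items := by rw [← hk]; exact hq
          have hgd : g.getD p.1 PySem.Set.empty = q.2 :=
            PySem.Dict.getD_of_mem_items g hqm hn PySem.Set.empty
          rw [hgd, PySem.Set.add_eq_ite]
          split_ifs
          · rw [hqv]; exact hlen
          · rw [List.length_append, hqv]; omega
      · refine ⟨v, ?_, hlen⟩
        exact List.mem_map.mpr ⟨q, hq, by simp [Function.comp, hk, hqv]⟩
    · -- the heads list is unchanged entry-by-entry, so a duplicate persists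
      right
      simp only [PySem.Dict.values] at hdup ⊢
      rw [hitems]
      intro hnodup
      apply hdup
      have heq : ((g.items.map (fun q => if (q.1 == p.1) = true
            then (p.1, PySem.Set.add (g.getD p.1 PySem.Set.empty) p.2) else q)).map
            (·.2)).map (fun v => v.headD 0) =
          (g.items.map (·.2)).map (fun v => v.headD 0) := by
        rw [List.map_map, List.map_map, List.map_map]
        apply List.map_congr_left
        intro q hq
        by_cases hk : q.1 = p.1
        · have hqm : (p.1, q.2) ∈ g.items := by rw [← hk]; exact hq
          have hgd : g.getD p.1 PySem.Set.empty = q.2 :=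
            PySem.Dict.getD_of_mem_items g hqm hn PySem.Set.empty
          simp only [Function.comp, hk, beq_self_eq_true, if_true, hgd]
          exact pv_headD_add q.2 p.2 (hne q hq)
        · simp [Function.comp, hk]
      rw [heq] at hnodup
      exact hnodup
  · have hitems := PySem.Dict.items_insert_of_not_contains g
      (PySem.Set.add (g.getD p.1 PySem.Set.empty) p.2) (by simpa using hc)
    rcases h with ⟨v, hv, hlen⟩ | hdup
    · left
      simp only [PySem.Dict.values] at hv ⊢
      rw [hitems, List.map_append]
      exact ⟨v, List.mem_append_left _ hv, hlen⟩
    · right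
      simp only [PySem.Dict.values] at hdup ⊢
      rw [hitems, List.map_append, List.map_append]
      intro hnodup
      exact hdup (List.Nodup.of_append_left hnodup)

theorem pvBad_foldl (ps : List (Int × Int)) (g : PySem.Dict Int (PySem.Set Int))
    (hg : pvGInv g) (h : pvBad g) :
    pvGInv (ps.foldl pvAddPair g) ∧ pvBad (ps.foldl pvAddPair g) := by
  induction ps generalizing g with
  | nil => exact ⟨hg, h⟩
  | cons p ps ih =>
    exact ih (pvAddPair g p) (pvGInv_step g p hg) (pvBad_step g p hg h)

-- a set whose distinct elements are as many as its elements is duplicate-free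
theorem pv_ofList_length_eq (xs : List Int) (h : (PySem.Set.ofList xs).length = xs.length) :
    xs.Nodup := by
  have hperm : (PySem.Set.ofList xs).Perm xs.dedup := by
    rw [List.perm_ext_iff_of_nodup (PySem.Set.nodup_ofList xs) xs.nodup_dedup]
    intro a
    rw [PySem.Set.mem_ofList, List.mem_dedup]
  have hlen : xs.dedup.length = xs.length := by rw [← hperm.length_eq, h]
  have := List.Sublist.eq_of_length xs.dedup_sublist hlen
  rw [← List.dedup_eq_self]
  exact this

theorem pvBad_finish (g : PySem.Dict Int (PySem.Set Int)) (h : pvBad g) :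
    pvBFinish g = none := by
  rcases h with ⟨v, hv, hlen⟩ | hdup
  · have h1 : g.values.any (fun v => v.length ≠ 1) = true := by
      rw [List.any_eq_true]
      exact ⟨v, hv, by simp; omega⟩
    unfold pvBFinish
    rw [h1]
    rfl
  · by_cases h1 : g.values.any (fun v => v.length ≠ 1) = true
    · unfold pvBFinish
      rw [h1]
      rfl
    · have h2 : (PySem.Set.ofList (g.values.map (fun v => v.headD 0))).length ≠
          (g.values.map (fun v => v.headD 0)).length := by
        intro heq
        exact hdup (pv_ofList_length_eq _ heq)
      unfold pvBFinish
      rw [Bool.eq_false_iff.mpr h1] at *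
      rw [if_neg (by simp), if_pos h2]

-- the invariant linking A's two dicts to B's groups dict along a successful run
def pvRel (g : PySem.Dict Int (PySem.Set Int)) (m i : PySem.Dict Int Int) : Prop :=
  g.keys.Nodup ∧ m.keys.Nodup ∧ i.keys.Nodup ∧
  m.items = g.items.map (fun p => (p.1, p.2.headD 0)) ∧
  (∀ p ∈ g.items, ∃ d, p.2 = [d]) ∧
  i.items = m.items.map Prod.swap

theorem pvRel_keys (g : PySem.Dict Int (PySem.Set Int)) (m i : PySem.Dict Int Int)
    (h : pvRel g m i) : m.keys = g.keys := by
  obtain ⟨_, _, _, hm, _, _⟩ := h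
  simp only [PySem.Dict.keys, hm, List.map_map]
  rfl

theorem pvRel_heads (g : PySem.Dict Int (PySem.Set Int)) (m i : PySem.Dict Int Int)
    (h : pvRel g m i) : g.values.map (fun v => v.headD 0) = m.values := by
  obtain ⟨_, _, _, hm, _, _⟩ := h
  simp only [PySem.Dict.values, hm, List.map_map]
  rfl

theorem pvRel_ikeys (g : PySem.Dict Int (PySem.Set Int)) (m i : PySem.Dict Int Int)
    (h : pvRel g m i) : i.keys = m.values := by
  obtain ⟨_, _, _, _, _, hi⟩ := h
  simp only [PySem.Dict.keys, PySem.Dict.values, hi, List.map_map]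
  rfl

-- the main simulation: from a related state, B's global verdict on the final groups dict
-- equals A's early-abort verdict, and on success the returned items coincide
theorem pvMain (ps : List (Int × Int)) (g : PySem.Dict Int (PySem.Set Int))
    (m i : PySem.Dict Int Int) (h : pvRel g m i) :
    pvBFinish (ps.foldl pvAddPair g) =
      (pvStRun ps m i).map (fun st => st.1.items) := by
  induction ps generalizing g m i with
  | nil =>
    obtain ⟨hgn, hmn, hin, hm, hsing, hi⟩ := h
    have hrel : pvRel g m i := ⟨hgn, hmn, hin, hm, hsing, hi⟩
    simp only [List.foldl_nil, pvStRun, Option.map_some]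
    have h1 : g.values.any (fun v => v.length ≠ 1) = false := by
      rw [List.any_eq_false]
      intro v hv
      simp only [PySem.Dict.values] at hv
      obtain ⟨p, hp, hpv⟩ := List.mem_map.mp hv
      obtain ⟨d, hd⟩ := hsing p hp
      simp [← hpv, hd]
    have hnh : (g.values.map (fun v => v.headD 0)).Nodup := by
      rw [pvRel_heads g m i hrel, ← pvRel_ikeys g m i hrel]
      exact hin
    have h2 : (PySem.Set.ofList (g.values.map (fun v => v.headD 0))).length =
        (g.values.map (fun v => v.headD 0)).length := by
      rw [PySem.Set.ofList_eq_self_of_nodup _ hnh]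
    unfold pvBFinish
    rw [h1, if_neg (by simp), if_neg (not_not_intro h2), hm]
  | cons p ps ih =>
    obtain ⟨s, d⟩ := p
    obtain ⟨hgn, hmn, hin, hm, hsing, hi⟩ := h
    have hrel : pvRel g m i := ⟨hgn, hmn, hin, hm, hsing, hi⟩
    have hgne : ∀ p ∈ g.items, p.2 ≠ [] := by
      intro p hp
      obtain ⟨e, he⟩ := hsing p hp
      simp [he]
    simp only [List.foldl_cons, pvStRun]
    cases hms : m.get? s with
    | some d0 =>
      -- s already grouped: its group is the singleton [d0]
      have hmem : (s, d0) ∈ m.items := PySem.Dict.mem_items_of_get?_eq_some m hms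
      rw [hm] at hmem
      obtain ⟨q, hq, hqe⟩ := List.mem_map.mp hmem
      obtain ⟨d1, hd1⟩ := hsing q hq
      have hq1 : q.1 = s := congrArg Prod.fst hqe
      have hq2 : d1 = d0 := by
        have h2 := congrArg Prod.snd hqe
        simp only [hd1] at h2
        simpa using h2
      have hqeq : q = (s, [d0]) := by
        obtain ⟨q1, q2⟩ := q
        simp only at hq1 hd1
        rw [hq1] at *
        rw [hd1, hq2]
      rw [hqeq] at hq
      have hget : g.get? s = some [d0] := PySem.Dict.get?_of_mem_items g hq hgn
      have hgd : g.getD s PySem.Set.empty = [d0] :=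
        PySem.Dict.getD_of_mem_items g hq hgn PySem.Set.empty
      by_cases hdd : d0 = d
      · -- consistent repeat: both sides keep their state
        subst hdd
        rw [if_neg (by simp)]
        have hmem2 : (d0, s) ∈ i.items := by
          rw [hi]
          exact List.mem_map.mpr ⟨(s, d0), PySem.Dict.mem_items_of_get?_eq_some m hms, rfl⟩
        have hig : i.get? d0 = some s := PySem.Dict.get?_of_mem_items i hmem2 hin
        rw [hig, if_neg (by simp)]
        have hmi : m.insert s d0 = m := pv_insert_self m s d0 hmn hms
        have hii : i.insert d0 s = i := pv_insert_self i d0 s hin hig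
        have hgg : pvAddPair g (s, d0) = g := by
          unfold pvAddPair
          simp only [hgd]
          rw [PySem.Set.add_of_mem (by simp), pv_insert_self g s [d0] hgn hget]
        rw [hmi, hii, hgg]
        exact ih g m i hrel
      · -- conflict mapping[s] ≠ d: A aborts; B's group at s becomes a 2-element set
        rw [if_pos (by simp [hdd])]
        simp only [Option.map_none]
        have hbad : pvBad (pvAddPair g (s, d)) := by
          left
          refine ⟨PySem.Set.add (g.getD s PySem.Set.empty) d, ?_, ?_⟩
          · simp only [PySem.Dict.values]
            exact List.mem_map.mpr ⟨(s, PySem.Set.add (g.getD s PySem.Set.empty) d),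
              PySem.Dict.mem_items_insert_self g s _, rfl⟩
          · rw [hgd, PySem.Set.add_of_not_mem (by simp [Ne.symm hdd])]
            simp
        obtain ⟨_, hbad'⟩ := pvBad_foldl ps _ (pvGInv_step g (s, d) ⟨hgn, hgne⟩) hbad
        exact pvBad_finish _ hbad'
    | none =>
      -- s is a fresh source colour
      rw [if_neg (by simp)]
      have hsk : s ∉ m.keys := by
        rw [← PySem.Dict.get?_eq_none_iff_not_mem_keys]
        exact hms
      have hgk : s ∉ g.keys := by rw [← pvRel_keys g m i hrel]; exact hsk
      have hgc : g.contains s = false := by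
        rw [Bool.eq_false_iff]
        intro hc
        exact hgk ((PySem.Dict.contains_iff_mem_keys g s).mp hc)
      have hgd : g.getD s PySem.Set.empty = [] := PySem.Dict.getD_of_not_contains g PySem.Set.empty hgc
      have hmc : m.contains s = false := by
        rw [PySem.Dict.contains_eq_isSome_get?, hms]
        rfl
      have hgadd : pvAddPair g (s, d) = g.insert s [d] := by
        unfold pvAddPair
        simp only [hgd]
        rfl
      cases hid : i.get? d with
      | some s' =>
        -- d already hit from another source: A aborts; B's heads list gets a duplicate
        have hmem2 : (d, s') ∈ i.items := PySem.Dict.mem_items_of_get?_eq_some i hid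
        rw [hi] at hmem2
        obtain ⟨q, hq, hqe⟩ := List.mem_map.mp hmem2
        have hq1 : q.1 = s' := congrArg Prod.snd hqe
        have hq2 : q.2 = d := congrArg Prod.fst hqe
        have hne : s' ≠ s := by
          intro he
          apply hsk
          rw [← he, ← hq1]
          exact PySem.Dict.mem_keys_of_mem_items m hq
        rw [if_pos (by simp [hne])]
        simp only [Option.map_none]
        have hdval : d ∈ m.values := by
          simp only [PySem.Dict.values]
          exact List.mem_map.mpr ⟨q, hq, hq2⟩
        have hbad : pvBad (pvAddPair g (s, d)) := by
          right
          rw [hgadd]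
          simp only [PySem.Dict.values]
          rw [PySem.Dict.items_insert_of_not_contains g [d] hgc]
          rw [List.map_append, List.map_append]
          intro hnodup
          have hdg : d ∈ (g.items.map (·.2)).map (fun v => v.headD 0) := by
            have hh := pvRel_heads g m i hrel
            simp only [PySem.Dict.values] at hh
            rw [hh]
            exact hdval
          rw [List.nodup_append] at hnodup
          exact hnodup.2.2 d hdg d (by simp) rfl
        obtain ⟨_, hbad'⟩ := pvBad_foldl ps _ (pvGInv_step g (s, d) ⟨hgn, hgne⟩) hbad
        exact pvBad_finish _ hbad'
      | none =>
        -- brand-new pair: all three dicts append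
        rw [if_neg (by simp)]
        have hic : i.contains d = false := by
          rw [PySem.Dict.contains_eq_isSome_get?, hid]
          rfl
        rw [hgadd]
        apply ih
        refine ⟨PySem.Dict.nodup_keys_insert g s [d] hgn,
          PySem.Dict.nodup_keys_insert m s d hmn,
          PySem.Dict.nodup_keys_insert i d s hin, ?_, ?_, ?_⟩
        · rw [PySem.Dict.items_insert_of_not_contains g [d] hgc,
            PySem.Dict.items_insert_of_not_contains m d hmc,
            List.map_append, hm]
          rfl
        · intro p hp
          rcases (PySem.Dict.mem_items_insert _ _ _ _).mp hp with hp | ⟨hp, _⟩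
          · exact ⟨d, by rw [hp]⟩
          · exact hsing p hp
        · rw [PySem.Dict.items_insert_of_not_contains i s hic,
            PySem.Dict.items_insert_of_not_contains m d hmc,
            List.map_append, hi]
          rfl

theorem pvDims_snd (g : List (List Int)) : (pvDims g).2 = ((g.headD []).length : Int) := by
  cases g <;> rfl

-- ===== VERDICT (by name: the statement is the Claim_ definition above) =====
theorem infer_bijective_palette_map_spec : Claim_equal_infer_bijective_palette_map := by
  intro src dst _ hpre
  unfold Pre_infer_bijective_palette_map at hpre
  unfold Spec_infer_bijective_palette_map
  unfold infer_bijective_palette_map infer_bijective_palette_map_alt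
  have e1 : pvShape src = pvDims src := rfl
  have e2 : pvShape dst = pvDims dst := rfl
  rw [e1, e2]
  by_cases hdims : pvDims src = pvDims dst
  · rw [if_neg (not_not_intro hdims), if_neg (not_not_intro hdims)]
    have hlen : dst.length = src.length := by
      have h1 : (src.length : Int) = (dst.length : Int) := congrArg Prod.fst hdims
      exact_mod_cast h1.symm
    have hw2 : ((src.headD []).length : Int) = ((dst.headD []).length : Int) := by
      rw [← pvDims_snd, ← pvDims_snd, hdims]
    have hweq : (src.headD []).length = (dst.headD []).length := by exact_mod_cast hw2
    obtain ⟨hws, hwd⟩ := hpre ⟨hlen.symm, hweq⟩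
    have hcast0 : (0 : Int) = ((0 : Nat) : Int) := rfl
    rw [pvDims_snd, hcast0,
      pvARows_eq_st src dst (src.headD []).length hlen hws hwd 0]
    simp only [List.drop_zero]
    -- B side: flatten the row loops, then run the simulation from the empty related state
    rw [pvBRows_eq_foldl]
    have hsl : ∀ xs : List Int,
        PySem.List.slice xs none (some (((src.headD []).length : Nat) : Int)) =
          xs.take (src.headD []).length := by
      intro xs
      rw [PySem.List.slice_to xs (Int.natCast_nonneg _), Int.toNat_natCast]
    simp only [hsl]
    rw [pvMain _ PySem.Dict.empty PySem.Dict.empty PySem.Dict.empty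
      ⟨PySem.Dict.nodup_keys_empty, PySem.Dict.nodup_keys_empty, PySem.Dict.nodup_keys_empty,
        rfl, by intro p hp; simp [PySem.Dict.empty] at hp, rfl⟩]
    cases pvStRun ((src.zip dst).flatMap
        (fun rr => (rr.1.take (src.headD []).length).zip (rr.2.take (src.headD []).length)))
        PySem.Dict.empty PySem.Dict.empty with
    | none => rfl
    | some st => obtain ⟨m, i⟩ := st; rfl
  · rw [if_pos hdims, if_pos hdims]
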